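-- pv_equiv track=rewrite | github.com/Gaurang-1402/binarysearch.com | embolden.py | solve
-- ===== SOURCE A (Python) =====
-- def solve(text, patterns):
--     n = len(text)
--     bolded = [False] * n
--
--     for pat in patterns:
--         start = text.find(pat)
--
--         while start != -1:
--             for i in range(start, start + len(pat)):
--                 bolded[i] = True
--
--             start = text.find(pat, start + 1)
--
--     ans = []
--     idx = 0
--
--     while idx < n:
--         if bolded[idx]:
--             ans.append("<b>")
--
--             while idx < n and bolded[idx]:
--                 ans.append(text[idx])
--                 idx += 1
--
--             ans.append("</b>")
--         else:
--             ans.append(text[idx])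
--             idx += 1
--
--     return "".join(ans)
-- ===== SOURCE B (Python) =====
-- def solve(text, patterns):
--     n = len(text)
--     diff = [0] * (n + 1)
--     for p in patterns:
--         start = text.find(p)
--         while start != -1:
--             diff[start] += 1
--             diff[start + len(p)] -= 1
--             start = text.find(p, start + 1)
--     out = []
--     run = 0
--     inside = False
--     for i, ch in enumerate(text):
--         run += diff[i]
--         if run > 0 and not inside:
--             out.append("<b>")
--             out.append(ch)
--             inside = True
--         elif run <= 0 and inside:
--             out.append("</b>")
--             out.append(ch)
--             inside = False
--         else:
--             out.append(ch)
--     if inside: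
--         out.append("</b>")
--     return "".join(out)
-- ===== Notes on version B (the rewrite author's own statement) =====
-- stated objective: alternative
-- what changed: B records each occurrence as two difference-array endpoint updates and renders the output in one transition-driven pass over the text, instead of A's per-character boolean marking of every occurrence followed by a nested run-scanning loop.
import Mathlib
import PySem

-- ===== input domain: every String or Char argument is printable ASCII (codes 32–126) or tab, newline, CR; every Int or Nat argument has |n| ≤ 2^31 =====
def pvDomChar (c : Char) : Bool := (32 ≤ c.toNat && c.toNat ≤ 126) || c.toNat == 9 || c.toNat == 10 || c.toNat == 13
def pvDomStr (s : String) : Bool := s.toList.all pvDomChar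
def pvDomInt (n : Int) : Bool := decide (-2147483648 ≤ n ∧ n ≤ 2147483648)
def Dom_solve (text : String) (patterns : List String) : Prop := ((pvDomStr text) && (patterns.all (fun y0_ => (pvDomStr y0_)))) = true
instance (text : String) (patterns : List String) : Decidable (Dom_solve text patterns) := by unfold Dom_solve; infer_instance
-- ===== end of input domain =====

-- B replaces A's per-character boolean marking and nested run-emitting scan by a difference array of
-- occurrence endpoints and a single transition-driven pass (alternative decomposition; same find-based matching).

-- ===== PORT A =====
-- 'for i in range(start, start+len(pat)): bolded[i] = True' (start is a find result, hence ≥ 0, so .toNat is exact)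
def pvMarkA (bolded : List Bool) (start stop : Int) : List Bool :=
  (PySem.List.pyRange start stop).foldl (fun b i => b.set i.toNat true) bolded
-- 'while start != -1: …mark…; start = text.find(pat, start+1)'.  Fuel n+1 bounds the iteration count:
-- successive find results strictly increase within 0..n, and at exhausted fuel the state is already final.
def pvMarkLoopA (cs pat : List Char) : List Bool → Int → Nat → List Bool
  | bolded, _, 0 => bolded
  | bolded, start, fuel+1 =>
    if start = -1 then bolded
    else pvMarkLoopA cs pat (pvMarkA bolded start (start + (pat.length : Int)))
           (PySem.Chars.findFrom cs pat (start + 1) none) fuel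
-- 'while idx < n and bolded[idx]: ans.append(text[idx]); idx += 1' (idx < n, so getD is exact)
def pvInnerA (cs : List Char) (bolded : List Bool) (n : Nat) (ans : List Char) (idx : Nat) : List Char × Nat :=
  if h : idx < n then
    if bolded.getD idx false then
      pvInnerA cs bolded n (ans ++ [cs.getD idx ' ']) (idx + 1)
    else (ans, idx)
  else (ans, idx)
termination_by n - idx
-- the outer 'while idx < n' loop; fuel n+1 bounds its iteration count (idx strictly increases each pass)
def pvScanA (cs : List Char) (bolded : List Bool) (n : Nat) : List Char → Nat → Nat → List Char
  | ans, _, 0 => ans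
  | ans, idx, fuel+1 =>
    if idx < n then
      if bolded.getD idx false then
        let r := pvInnerA cs bolded n (ans ++ ['<', 'b', '>']) idx
        pvScanA cs bolded n (r.1 ++ ['<', '/', 'b', '>']) r.2 fuel
      else pvScanA cs bolded n (ans ++ [cs.getD idx ' ']) (idx + 1) fuel
    else ans
-- ''.join(ans) of single characters and tag strings, flattened to one character list
def solve (text : String) (patterns : List String) : String :=
  let cs := text.toList
  let n := cs.length
  let bolded := patterns.foldl
    (fun b p => pvMarkLoopA cs p.toList b (PySem.Chars.find cs p.toList) (n + 1))
    (List.replicate n false)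
  String.ofList (pvScanA cs bolded n [] 0 (n + 1))
-- ===== PORT B =====
-- 'diff[i] += v' (indices are find results or start+len(pat) ≤ n: in range and ≥ 0)
def pvDiffAdd (d : List Int) (i : Nat) (v : Int) : List Int := d.set i (d.getD i 0 + v)
-- 'while start != -1: diff[start] += 1; diff[start+len(p)] -= 1; start = text.find(p, start+1)' (same fuel bound as A's loop)
def pvOccLoopB (cs pat : List Char) : List Int → Int → Nat → List Int
  | d, _, 0 => d
  | d, start, fuel+1 =>
    if start = -1 then d
    else pvOccLoopB cs pat
           (pvDiffAdd (pvDiffAdd d start.toNat 1) (start.toNat + pat.length) (-1))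
           (PySem.Chars.findFrom cs pat (start + 1) none) fuel
-- the body of 'for i, ch in enumerate(text)' with state (run, inside, out)
def pvStepB (d : List Int) (st : Int × Bool × List Char) (ic : Int × Char) : Int × Bool × List Char :=
  let run := st.1 + d.getD ic.1.toNat 0
  if 0 < run ∧ st.2.1 = false then (run, true, st.2.2 ++ ['<', 'b', '>'] ++ [ic.2])
  else if run ≤ 0 ∧ st.2.1 = true then (run, false, st.2.2 ++ ['<', '/', 'b', '>'] ++ [ic.2])
  else (run, st.2.1, st.2.2 ++ [ic.2])
-- final 'if inside: out.append("</b>")' and ''.join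
def solve_alt (text : String) (patterns : List String) : String :=
  let cs := text.toList
  let n := cs.length
  let diff := patterns.foldl
    (fun d p => pvOccLoopB cs p.toList d (PySem.Chars.find cs p.toList) (n + 1))
    (List.replicate (n + 1) (0 : Int))
  let fin := (PySem.List.enumerate cs).foldl (pvStepB diff) (0, false, [])
  String.ofList (if fin.2.1 then fin.2.2 ++ ['<', '/', 'b', '>'] else fin.2.2)

-- ===== PRECONDITION & SPEC =====
def Spec_solve (text : String) (patterns : List String) (out : String) : Prop := out = solve_alt text patterns
instance (text : String) (patterns : List String) (out : String) : Decidable (Spec_solve text patterns out) := by unfold Spec_solve; infer_instance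

-- ===== CLAIM (what is proved, stated in full; the proofs are below) =====
def Claim_equal_solve : Prop := ∀ (text : String) (patterns : List String), Dom_solve text patterns → Spec_solve text patterns (solve text patterns)

-- ===== LEMMAS AND PROOFS =====

-- prefix sum of B's difference array
def pvPartial (d : List Int) (k : Nat) : Int := (d.take k).sum

-- the canonical output for a list of (bold?, char) pairs, given the 'currently inside <b>' state
def pvEmit : Bool → List (Bool × Char) → List Char
  | false, [] => []
  | true, [] => ['<', '/', 'b', '>']
  | false, (f, c) :: rest => if f then '<' :: 'b' :: '>' :: c :: pvEmit true rest else c :: pvEmit false rest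
  | true, (f, c) :: rest => if f then c :: pvEmit true rest else '<' :: '/' :: 'b' :: '>' :: c :: pvEmit false rest

-- the simulation invariant between A's boolean array and B's difference array
def pvRel (n : Nat) (b : List Bool) (d : List Int) : Prop :=
  b.length = n ∧ d.length = n + 1 ∧ (∀ k : Nat, 0 ≤ pvPartial d k) ∧
    (∀ i : Nat, i < n → b.getD i false = decide (0 < pvPartial d (i + 1)))


theorem pvFindFrom_of_gt (s sub : List Char) (k : Int) (h : (s.length : Int) < k) :
    PySem.Chars.findFrom s sub k none = -1 := by
  have hk : ¬ k < 0 := by have := Int.natCast_nonneg s.length; omega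
  simp only [PySem.Chars.findFrom, if_neg hk, if_pos h]

theorem pvFindFrom_le_length (s sub : List Char) (k : Int) :
    PySem.Chars.findFrom s sub k none ≤ (s.length : Int) := by
  simp only [PySem.Chars.findFrom]
  have h0 := Int.natCast_nonneg s.length
  have h0 := Int.natCast_nonneg s.length
  set k' := (if k < 0 then if k + (s.length:Int) < 0 then 0 else k + (s.length:Int) else k) with hk'
  have hk0 : 0 ≤ k' := by rw [hk']; split_ifs <;> omega
  split_ifs with h1 h2
  · omega
  · omega
  · have hf := PySem.Chars.find_le_length (List.drop k'.toNat (List.take ((s.length : Int)).toNat s)) sub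
    have hlen : (List.drop k'.toNat (List.take ((s.length : Int)).toNat s)).length = s.length - k'.toNat := by
      simp
    rw [hlen] at hf
    have hfn := PySem.Chars.neg_one_le_find (List.drop k'.toNat (List.take ((s.length : Int)).toNat s)) sub
    omega

theorem pvPyRange_nil (a b : Int) (h : b ≤ a) : PySem.List.pyRange a b = [] := by
  simp [PySem.List.pyRange]; omega

theorem pvMarkA_succ (b : List Bool) (s m : Nat) :
    pvMarkA b (s : Int) ((s : Int) + ((m+1 : Nat) : Int))
      = pvMarkA (b.set s true) ((s+1 : Nat) : Int) (((s+1 : Nat) : Int) + (m : Int)) := by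
  unfold pvMarkA
  rw [PySem.List.pyRange_one_cons (by push_cast; omega)]
  have harg : ((s : Int) + ((m+1 : Nat) : Int)) = (((s+1 : Nat) : Int) + (m : Int)) := by push_cast; ring
  have harg2 : ((s : Int) + 1) = (((s+1 : Nat)) : Int) := by push_cast; ring
  simp only [List.foldl_cons, Int.toNat_natCast, harg, harg2]

theorem pvMarkA_zero (b : List Bool) (s : Nat) :
    pvMarkA b (s : Int) ((s : Int) + ((0 : Nat) : Int)) = b := by
  unfold pvMarkA
  rw [pvPyRange_nil _ _ (by push_cast; omega)]
  rfl

theorem pvMarkA_length (b : List Bool) (s m : Nat) :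
    (pvMarkA b (s : Int) ((s : Int) + (m : Int))).length = b.length := by
  induction m generalizing s b with
  | zero => rw [pvMarkA_zero]
  | succ m ih => rw [pvMarkA_succ, ih, List.length_set]

theorem pvMarkA_getD (b : List Bool) (s m i : Nat) :
    (pvMarkA b (s : Int) ((s : Int) + (m : Int))).getD i false
      = ((decide (s ≤ i ∧ i < s + m) && decide (i < b.length)) || b.getD i false) := by
  induction m generalizing s b with
  | zero =>
    rw [pvMarkA_zero]
    have : decide (s ≤ i ∧ i < s + 0) = false := by rw [decide_eq_false_iff_not]; omega
    rw [this]
    simp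
  | succ m ih =>
    rw [pvMarkA_succ, ih]
    simp only [List.length_set, List.getD_eq_getElem?_getD, List.getElem?_set]
    by_cases hsi : s = i
    · subst hsi
      have e1 : decide (s + 1 ≤ s ∧ s < s + 1 + m) = false := by rw [decide_eq_false_iff_not]; omega
      have e2 : decide (s ≤ s ∧ s < s + (m + 1)) = true := by rw [decide_eq_true_eq]; omega
      rw [e1, e2]
      by_cases hl : s < b.length <;> simp [hl]
    · simp only [if_neg hsi]
      by_cases h1 : s + 1 ≤ i ∧ i < s + 1 + m
      · have e1 : decide (s + 1 ≤ i ∧ i < s + 1 + m) = true := by rw [decide_eq_true_eq]; omega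
        have e2 : decide (s ≤ i ∧ i < s + (m + 1)) = true := by rw [decide_eq_true_eq]; omega
        rw [e1, e2]
      · have h2 : ¬ (s ≤ i ∧ i < s + (m + 1)) := by omega
        have e1 : decide (s + 1 ≤ i ∧ i < s + 1 + m) = false := by rw [decide_eq_false_iff_not]; omega
        have e2 : decide (s ≤ i ∧ i < s + (m + 1)) = false := by rw [decide_eq_false_iff_not]; omega
        rw [e1, e2]

theorem pvSum_set (d : List Int) (j : Nat) (x : Int) (hj : j < d.length) :
    (d.set j x).sum = d.sum - d[j] + x := by
  induction d generalizing j with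
  | nil => simp at hj
  | cons a t ih =>
    cases j with
    | zero => simp [List.set]; ring
    | succ j =>
      simp only [List.set, List.sum_cons, List.getElem_cons_succ]
      rw [ih j (by simpa using hj)]
      ring

theorem pvPartial_diffAdd (d : List Int) (j : Nat) (v : Int) (k : Nat) (hj : j < d.length) :
    pvPartial (pvDiffAdd d j v) k = pvPartial d k + (if j < k then v else 0) := by
  unfold pvPartial pvDiffAdd
  rw [List.take_set]
  by_cases h : j < k
  · have hjk : j < (d.take k).length := by simp; omega
    rw [pvSum_set _ _ _ hjk]
    have : (d.take k)[j] = d[j]'hj := by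
      simp [List.getElem_take]
    rw [this, List.getD_eq_getElem d 0 hj]
    simp [h]
    ring
  · have : (d.take k).set j (d.getD j 0 + v) = d.take k := by
      apply List.set_eq_of_length_le
      simp
      omega
    rw [this]
    simp [h]

theorem pvRel_step (n : Nat) (b : List Bool) (d : List Int) (s m : Nat)
    (hrel : pvRel n b d) (hsm : s + m ≤ n) :
    pvRel n (pvMarkA b (s : Int) ((s : Int) + (m : Int)))
      (pvDiffAdd (pvDiffAdd d s 1) (s + m) (-1)) := by
  obtain ⟨hb, hd, hpos, hflag⟩ := hrel
  have hs1 : s < d.length := by omega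
  have hs2 : s + m < (pvDiffAdd d s 1).length := by simp [pvDiffAdd]; omega
  have hq' : ∀ k, pvPartial (pvDiffAdd (pvDiffAdd d s 1) (s + m) (-1)) k
      = pvPartial d k + (if s < k ∧ k ≤ s + m then 1 else 0) := by
    intro k
    rw [pvPartial_diffAdd _ _ _ _ hs2, pvPartial_diffAdd _ _ _ _ hs1]
    split_ifs <;> omega
  refine ⟨by rw [pvMarkA_length]; exact hb, by simp [pvDiffAdd]; omega, ?_, ?_⟩
  · intro k; rw [hq' k]; have := hpos k; split_ifs <;> omega
  · intro i hi
    rw [pvMarkA_getD, hq' (i + 1), hflag i hi]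
    have hib : decide (i < b.length) = true := by rw [decide_eq_true_eq]; omega
    rw [hib]
    have hqi := hpos (i + 1)
    by_cases hc : s ≤ i ∧ i < s + m
    · have e1 : decide (s ≤ i ∧ i < s + m) = true := by rw [decide_eq_true_eq]; omega
      have e2 : (if s < i + 1 ∧ i + 1 ≤ s + m then (1 : Int) else 0) = 1 := by rw [if_pos]; omega
      have e3 : decide (0 < pvPartial d (i + 1) + 1) = true := by rw [decide_eq_true_eq]; omega
      rw [e1, e2, e3]; simp
    · have e1 : decide (s ≤ i ∧ i < s + m) = false := by rw [decide_eq_false_iff_not]; omega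
      have e2 : (if s < i + 1 ∧ i + 1 ≤ s + m then (1 : Int) else 0) = 0 := by rw [if_neg]; omega
      rw [e1, e2, add_zero]; simp

theorem pvRel_loop (cs pat : List Char) (n : Nat) (hn : n = cs.length) :
    ∀ (fuel : Nat) (start : Int) (b : List Bool) (d : List Int), pvRel n b d →
    (start = -1 ∨ (0 ≤ start ∧ start ≤ (n : Int) ∧ pat <+: cs.drop start.toNat)) →
    pvRel n (pvMarkLoopA cs pat b start fuel) (pvOccLoopB cs pat d start fuel) := by
  intro fuel
  induction fuel with
  | zero => intro start b d hrel _; simpa [pvMarkLoopA, pvOccLoopB] using hrel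
  | succ fuel ih =>
    intro start b d hrel hside
    by_cases hstart : start = -1
    · simpa [pvMarkLoopA, pvOccLoopB, hstart] using hrel
    · rcases hside with h | ⟨h0, hle, hpre⟩
      · exact absurd h hstart
      have hseq : start = (start.toNat : Int) := (Int.toNat_of_nonneg h0).symm
      have hsn : start.toNat ≤ n := by omega
      have hm : start.toNat + pat.length ≤ n := by
        have h1 := hpre.length_le
        rw [List.length_drop] at h1
        omega
      simp only [pvMarkLoopA, pvOccLoopB, if_neg hstart]
      have hrel' := pvRel_step n b d start.toNat pat.length hrel hm
      rw [← hseq] at hrel'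
      apply ih
      · exact hrel'
      · -- side condition for the next find result
        by_cases hnext : PySem.Chars.findFrom cs pat (start + 1) none = -1
        · left; exact hnext
        · right
          have hk1 : (start + 1) = ((start.toNat + 1 : Nat) : Int) := by omega
          by_cases hkle : start.toNat + 1 ≤ cs.length
          · rw [hk1] at hnext ⊢
            obtain ⟨hge, hpre', _⟩ := PySem.Chars.findFrom_natCast_spec cs pat (start.toNat + 1) hkle hnext
            refine ⟨by omega, ?_, hpre'⟩
            rw [hn]
            exact pvFindFrom_le_length cs pat _
          · exfalso
            apply hnext
            rw [hk1]
            exact pvFindFrom_of_gt cs pat _ (by omega)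

theorem pvPartial_replicate (n k : Nat) : pvPartial (List.replicate n (0 : Int)) k = 0 := by
  simp [pvPartial, List.take_replicate]

theorem pvRel_init (n : Nat) : pvRel n (List.replicate n false) (List.replicate (n + 1) (0 : Int)) := by
  refine ⟨by simp, by simp, fun k => by rw [pvPartial_replicate], fun i hi => by
    rw [pvPartial_replicate]; simp⟩

theorem pvRel_fold (cs : List Char) (n : Nat) (hn : n = cs.length) (patterns : List String) :
    pvRel n
      (patterns.foldl (fun b p => pvMarkLoopA cs p.toList b (PySem.Chars.find cs p.toList) (n + 1)) (List.replicate n false))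
      (patterns.foldl (fun d p => pvOccLoopB cs p.toList d (PySem.Chars.find cs p.toList) (n + 1)) (List.replicate (n + 1) (0 : Int))) := by
  have main : ∀ (ps : List String) (b : List Bool) (d : List Int), pvRel n b d →
      pvRel n (ps.foldl (fun b p => pvMarkLoopA cs p.toList b (PySem.Chars.find cs p.toList) (n + 1)) b)
        (ps.foldl (fun d p => pvOccLoopB cs p.toList d (PySem.Chars.find cs p.toList) (n + 1)) d) := by
    intro ps
    induction ps with
    | nil => intro b d h; simpa using h
    | cons p ps ih =>
      intro b d h
      simp only [List.foldl_cons]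
      apply ih
      apply pvRel_loop cs p.toList n hn _ _ _ _ h
      by_cases hf : PySem.Chars.find cs p.toList = -1
      · left; exact hf
      · right
        have h1 := PySem.Chars.neg_one_le_find cs p.toList
        have h0 : 0 ≤ PySem.Chars.find cs p.toList := by omega
        refine ⟨h0, by rw [hn]; exact PySem.Chars.find_le_length cs p.toList, (PySem.Chars.find_spec h0).1⟩
  exact main patterns _ _ (pvRel_init n)

theorem pvZip_drop_cons (b : List Bool) (cs : List Char) (n idx : Nat) (hb : b.length = n) (hc : cs.length = n)
    (h : idx < n) :
    (b.drop idx).zip (cs.drop idx)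
      = (b.getD idx false, cs.getD idx ' ') :: (b.drop (idx + 1)).zip (cs.drop (idx + 1)) := by
  have h1 : idx < b.length := by omega
  have h2 : idx < cs.length := by omega
  rw [List.drop_eq_getElem_cons h1, List.drop_eq_getElem_cons h2, List.zip_cons_cons,
      List.getD_eq_getElem b false h1, List.getD_eq_getElem cs ' ' h2]

theorem pvZip_drop_n (b : List Bool) (cs : List Char) (n : Nat) (hb : b.length = n) (hc : cs.length = n)
    (idx : Nat) (h : n ≤ idx) : (b.drop idx).zip (cs.drop idx) = [] := by
  rw [List.drop_eq_nil_of_le (by omega), List.zip_nil_left]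

theorem pvInnerA_spec (cs : List Char) (b : List Bool) (n : Nat) (hb : b.length = n) (hc : cs.length = n) :
    ∀ (idx : Nat) (ans : List Char), idx ≤ n →
      idx ≤ (pvInnerA cs b n ans idx).2 ∧ (pvInnerA cs b n ans idx).2 ≤ n ∧
      (idx < n → b.getD idx false = true → idx < (pvInnerA cs b n ans idx).2) ∧
      (pvInnerA cs b n ans idx).1 ++ ['<', '/', 'b', '>']
          ++ pvEmit false ((b.drop (pvInnerA cs b n ans idx).2).zip (cs.drop (pvInnerA cs b n ans idx).2))
        = ans ++ pvEmit true ((b.drop idx).zip (cs.drop idx)) := by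
  have H : ∀ (k idx : Nat) (ans : List Char), n - idx ≤ k → idx ≤ n →
      idx ≤ (pvInnerA cs b n ans idx).2 ∧ (pvInnerA cs b n ans idx).2 ≤ n ∧
      (idx < n → b.getD idx false = true → idx < (pvInnerA cs b n ans idx).2) ∧
      (pvInnerA cs b n ans idx).1 ++ ['<', '/', 'b', '>']
          ++ pvEmit false ((b.drop (pvInnerA cs b n ans idx).2).zip (cs.drop (pvInnerA cs b n ans idx).2))
        = ans ++ pvEmit true ((b.drop idx).zip (cs.drop idx)) := by
    intro k
    induction k with
    | zero =>
      intro idx ans hk hle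
      have hidx : idx = n := by omega
      rw [pvInnerA, dif_neg (by omega : ¬ idx < n)]
      refine ⟨le_refl _, by omega, by omega, ?_⟩
      rw [pvZip_drop_n b cs n hb hc idx (by omega)]
      simp [pvEmit]
    | succ k ih =>
      intro idx ans hk hle
      rw [pvInnerA]
      by_cases h : idx < n
      · rw [dif_pos h]
        by_cases hbold : b.getD idx false
        · rw [if_pos hbold]
          obtain ⟨i1, i2, _, i4⟩ := ih (idx + 1) (ans ++ [cs.getD idx ' ']) (by omega) (by omega)
          refine ⟨by omega, i2, fun _ _ => by omega, ?_⟩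
          rw [i4, pvZip_drop_cons b cs n idx hb hc h, hbold]
          simp [pvEmit]
        · rw [if_neg hbold]
          refine ⟨le_refl _, by omega, fun _ hh => absurd hh hbold, ?_⟩
          rw [pvZip_drop_cons b cs n idx hb hc h]
          simp only [Bool.not_eq_true] at hbold
          rw [hbold]
          simp [pvEmit]
      · rw [dif_neg h]
        refine ⟨le_refl _, by omega, by omega, ?_⟩
        rw [pvZip_drop_n b cs n hb hc idx (by omega)]
        simp [pvEmit]
  intro idx ans hle
  exact H (n - idx) idx ans (le_refl _) hle

theorem pvScanA_emit (cs : List Char) (b : List Bool) (n : Nat) (hb : b.length = n) (hc : cs.length = n) :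
    ∀ (fuel idx : Nat) (ans : List Char), idx ≤ n → n - idx < fuel →
      pvScanA cs b n ans idx fuel = ans ++ pvEmit false ((b.drop idx).zip (cs.drop idx)) := by
  intro fuel
  induction fuel with
  | zero => intro idx ans _ hk; omega
  | succ fuel ih =>
    intro idx ans hle hk
    by_cases h : idx < n
    · by_cases hbold : b.getD idx false
      · obtain ⟨i1, i2, i3, i4⟩ := pvInnerA_spec cs b n hb hc idx (ans ++ ['<', 'b', '>']) (by omega)
        have hlt : idx < (pvInnerA cs b n (ans ++ ['<', 'b', '>']) idx).2 := i3 h hbold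
        simp only [pvScanA, if_pos h, if_pos hbold]
        rw [ih _ _ i2 (by omega)]
        rw [i4, pvZip_drop_cons b cs n idx hb hc h, hbold]
        simp [pvEmit]
      · simp only [pvScanA, if_pos h, if_neg hbold]
        rw [ih _ _ (by omega) (by omega)]
        rw [pvZip_drop_cons b cs n idx hb hc h]
        simp only [Bool.not_eq_true] at hbold
        rw [hbold]
        simp [pvEmit]
    · simp only [pvScanA, if_neg h]
      rw [pvZip_drop_n b cs n hb hc idx (by omega)]
      simp [pvEmit]

theorem pvPartial_succ (d : List Int) (i : Nat) (hi : i < d.length) :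
    pvPartial d (i + 1) = pvPartial d i + d.getD i 0 := by
  unfold pvPartial
  rw [List.take_add_one, List.sum_append]
  congr 1
  rw [List.getD_eq_getElem?_getD, List.getElem?_eq_getElem hi]
  simp

theorem pvEnumerate_cons {α : Type} (c : α) (u : List α) (i : Int) :
    PySem.List.enumerate (c :: u) i = (i, c) :: PySem.List.enumerate u (i + 1) := by
  simp [PySem.List.enumerate]

theorem pvEnumerate_nil {α : Type} (i : Int) : PySem.List.enumerate ([] : List α) i = [] := by
  simp [PySem.List.enumerate]

theorem pvFoldB_emit (d : List Int) (n : Nat) (hd : d.length = n + 1) :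
    ∀ (u : List Char) (i : Nat) (run : Int) (inside : Bool) (acc : List Char),
      i + u.length = n → run = pvPartial d i →
      (let fin := (PySem.List.enumerate u (i : Int)).foldl (pvStepB d) (run, inside, acc)
       (if fin.2.1 then fin.2.2 ++ ['<', '/', 'b', '>'] else fin.2.2))
        = acc ++ pvEmit inside
            (((List.range' i u.length).map (fun j => decide (0 < pvPartial d (j + 1)))).zip u) := by
  intro u
  induction u with
  | nil =>
    intro i run inside acc hlen hrun
    rw [pvEnumerate_nil]
    cases inside <;> simp [pvEmit]
  | cons c u ih =>
    intro i run inside acc hlen hrun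
    rw [pvEnumerate_cons, List.foldl_cons]
    simp only [List.length_cons]
    rw [List.range'_succ, List.map_cons, List.zip_cons_cons]
    have hi : i < d.length := by simp at hlen; omega
    have hrun' : run + d.getD i 0 = pvPartial d (i + 1) := by
      rw [hrun, ← pvPartial_succ d i hi]
    have hcast : ((i : Int) + 1) = ((i + 1 : Nat) : Int) := by omega
    have hlen' : (i + 1) + u.length = n := by simp at hlen; omega
    by_cases hpos : 0 < run + d.getD i 0
    · have hflag : decide (0 < pvPartial d (i + 1)) = true := by rw [decide_eq_true_eq]; omega
      rw [hflag]
      cases inside with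
      | false =>
        have hstep : pvStepB d (run, false, acc) ((i : Int), c)
            = (run + d.getD i 0, true, acc ++ ['<', 'b', '>'] ++ [c]) := by
          simp only [pvStepB, Int.toNat_natCast]
          split_ifs with h1 h2 <;> simp_all
        rw [hstep, hcast, ih (i + 1) _ true _ hlen' hrun']
        simp [pvEmit]
      | true =>
        have hstep : pvStepB d (run, true, acc) ((i : Int), c)
            = (run + d.getD i 0, true, acc ++ [c]) := by
          simp only [pvStepB, Int.toNat_natCast]
          (split_ifs with h1 h2 <;> simp_all); omega
        rw [hstep, hcast, ih (i + 1) _ true _ hlen' hrun']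
        simp [pvEmit]
    · have hflag : decide (0 < pvPartial d (i + 1)) = false := by rw [decide_eq_false_iff_not]; omega
      have hle : run + d.getD i 0 ≤ 0 := by omega
      rw [hflag]
      cases inside with
      | false =>
        have hstep : pvStepB d (run, false, acc) ((i : Int), c)
            = (run + d.getD i 0, false, acc ++ [c]) := by
          simp only [pvStepB, Int.toNat_natCast]
          (split_ifs with h1 h2 <;> simp_all); omega
        rw [hstep, hcast, ih (i + 1) _ false _ hlen' hrun']
        simp [pvEmit]
      | true =>
        have hstep : pvStepB d (run, true, acc) ((i : Int), c)
            = (run + d.getD i 0, false, acc ++ ['<', '/', 'b', '>'] ++ [c]) := by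
          simp only [pvStepB, Int.toNat_natCast]
          split_ifs with h1 h2 <;> simp_all
        rw [hstep, hcast, ih (i + 1) _ false _ hlen' hrun']
        simp [pvEmit]

-- ===== VERDICT (by name: the statement is the Claim_ definition above) =====
theorem solve_spec : Claim_equal_solve := by
  intro text patterns _
  unfold Spec_solve solve solve_alt
  dsimp only
  set cs := text.toList with hcs
  set n := cs.length with hn
  set b := patterns.foldl (fun b p => pvMarkLoopA cs p.toList b (PySem.Chars.find cs p.toList) (n + 1)) (List.replicate n false) with hbdef
  set d := patterns.foldl (fun d p => pvOccLoopB cs p.toList d (PySem.Chars.find cs p.toList) (n + 1)) (List.replicate (n + 1) (0 : Int)) with hddef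
  obtain ⟨hb, hd, hpos, hflag⟩ := pvRel_fold cs n rfl patterns
  rw [← hbdef] at hb hflag
  rw [← hddef] at hd hpos hflag
  congr 1
  rw [pvScanA_emit cs b n hb rfl (n + 1) 0 [] (by omega) (by omega)]
  have hfold := pvFoldB_emit d n hd cs 0 0 false [] (by omega) (by simp [pvPartial])
  simp only [Nat.cast_zero] at hfold
  rw [hfold]
  simp only [List.drop_zero, List.nil_append]
  congr 1
  congr 1
  apply List.ext_getElem
  · simp [hb]
    exact hn
  · intro i h1 h2
    have hi : i < n := by simpa [hb] using h1
    have := hflag i hi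
    rw [List.getD_eq_getElem b false h1] at this
    rw [this]
    simp
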